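-- pv_equiv track=rewrite | github.com/Murazakl/main | I33/tp6bis.py | vect
-- ===== SOURCE A (Python) =====
-- def vect(L):
--     Lres, i = [], len(L[0])
--     for j in range(1 << len(L)):
--         l, k, L2 = j, 0, [0] * i
--         while l != 0:
--             if l & 1:
--                 for m in range(i):
--                     L2[m] = L2[m] ^ L[k][m]
--             k += 1
--             l = l >> 1
--         Lres += [L2]
--     return Lres
-- ===== SOURCE B (Python) =====
-- def vect(L):
--     i = len(L[0])
--     res = [[0] * i]
--     for row in L:
--         r = row[:i]
--         res += [[a ^ b for a, b in zip(v, r)] for v in res]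
--     return res
-- ===== Notes on version B (the rewrite author's own statement) =====
-- stated objective: faster
-- what changed: Replaces the per-subset bit-scanning inner while/for loops (recomputing each subset XOR from scratch) by a doubling DP that builds all 2^n subset XORs in binary order, extending the result list once per row; intended as asymptotically faster (O(2^n i) vs O(2^n n i)); measured 6.4x at n=256, the largest size both finished (output itself is exponential in n).
import Mathlib
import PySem

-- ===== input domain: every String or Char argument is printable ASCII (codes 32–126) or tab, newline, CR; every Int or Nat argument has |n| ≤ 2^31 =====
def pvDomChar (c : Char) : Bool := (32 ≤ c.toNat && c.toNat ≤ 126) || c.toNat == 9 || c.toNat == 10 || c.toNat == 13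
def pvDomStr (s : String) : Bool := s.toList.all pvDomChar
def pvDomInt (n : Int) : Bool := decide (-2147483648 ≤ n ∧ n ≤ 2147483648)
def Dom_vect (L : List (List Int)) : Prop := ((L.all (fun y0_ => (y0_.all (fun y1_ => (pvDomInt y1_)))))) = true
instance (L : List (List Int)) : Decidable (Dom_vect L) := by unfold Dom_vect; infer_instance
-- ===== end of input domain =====

-- B replaces A's per-subset bit-scanning loops by a doubling DP over the rows (intended as faster; measured 6.4x at n=256 in a timing run); return value identical on Pre_.

-- ===== PORT A =====
-- "for m in range(i): L2[m] = L2[m] ^ L[k][m]"; indices are in range on Pre_, the getD default is never used there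
def vectXor (i : Nat) (L2 row : List Int) : List Int :=
  (List.range i).map (fun m => PySem.Int.bxor (L2.getD m 0) (row.getD m 0))

-- "while l != 0: if l & 1: …; k += 1; l = l >> 1"  (l = j ≥ 0, carried as Nat)
def vectLoop (L : List (List Int)) (i : Nat) (l k : Nat) (L2 : List Int) : List Int :=
  if l = 0 then L2
  else vectLoop L i (l / 2) (k + 1) (if l % 2 = 1 then vectXor i L2 (L.getD k []) else L2)
termination_by l
decreasing_by exact Nat.div_lt_self (Nat.pos_of_ne_zero (by assumption)) (by omega)

-- range(1 << len(L)) yields the nonnegative ints 0..2^n-1; ported over Nat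
def vect (L : List (List Int)) : List (List Int) :=
  let i := (L.headD []).length
  (List.range (2 ^ L.length)).map (fun j => vectLoop L i j 0 (List.replicate i 0))

-- ===== PORT B =====
def vect_alt (L : List (List Int)) : List (List Int) :=
  let i := (L.headD []).length
  L.foldl (fun res row =>
      res ++ res.map (fun v => List.zipWith PySem.Int.bxor v (row.take i)))
    [List.replicate i (0 : Int)]

-- ===== PRECONDITION & SPEC =====
-- Pre_ excludes exactly the inputs where Python A raises IndexError: the empty list (L[0]) and
-- lists with a row shorter than the first row (L[k][m]).
def Pre_vect (L : List (List Int)) : Prop :=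
  L ≠ [] ∧ ∀ r ∈ L, (L.headD []).length ≤ r.length
instance (L : List (List Int)) : Decidable (Pre_vect L) := by unfold Pre_vect; infer_instance
def pvWitness_vect : List (List Int) := [[1, 2], [3, 4]]
def Spec_vect (L : List (List Int)) (out : List (List Int)) : Prop := out = vect_alt L
instance (L : List (List Int)) (out : List (List Int)) : Decidable (Spec_vect L out) := by unfold Spec_vect; infer_instance

-- ===== CLAIM (what is proved, stated in full; the proofs are below) =====
def Claim_equal_vect : Prop := ∀ (L : List (List Int)), Dom_vect L → Pre_vect L → Spec_vect L (vect L)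

-- ===== LEMMAS AND PROOFS =====

-- common specification: XOR of the rows of P selected by the (low-first) bits of j, folded into acc
def subXor (i : Nat) : List (List Int) → Nat → List Int → List Int
  | [], _, acc => acc
  | r :: t, j, acc => subXor i t (j / 2) (if j % 2 = 1 then vectXor i acc r else acc)

theorem subXor_zero (i : Nat) (P : List (List Int)) (acc : List Int) :
    subXor i P 0 acc = acc := by
  induction P with
  | nil => rfl
  | cons r t ih => simp [subXor, ih]

theorem subXor_append (i : Nat) (P Q : List (List Int)) :
    ∀ (j : Nat) (acc : List Int),
      subXor i (P ++ Q) j acc = subXor i Q (j / 2 ^ P.length) (subXor i P j acc) := by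
  induction P with
  | nil => intro j acc; simp [subXor]
  | cons r t ih =>
      intro j acc
      simp only [List.cons_append, subXor, ih, List.length_cons]
      congr 1
      rw [Nat.div_div_eq_div_mul, pow_succ']

theorem subXor_mod (i : Nat) (P : List (List Int)) :
    ∀ (j : Nat) (acc : List Int), subXor i P j acc = subXor i P (j % 2 ^ P.length) acc := by
  induction P with
  | nil => intro j acc; rfl
  | cons r t ih =>
      intro j acc
      have h2 : j % 2 ^ (t.length + 1) % 2 = j % 2 := by
        rw [Nat.mod_mod_of_dvd]
        exact dvd_pow_self 2 (Nat.succ_ne_zero _)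
      have hd : j % 2 ^ (t.length + 1) / 2 = j / 2 % 2 ^ t.length := by
        rw [pow_succ', Nat.mod_mul_right_div_self]
      simp only [subXor, List.length_cons, h2, hd]
      rw [ih (j / 2), ih (j / 2 % 2 ^ t.length), Nat.mod_mod_of_dvd _ dvd_rfl]

theorem vectXor_length (i : Nat) (acc r : List Int) : (vectXor i acc r).length = i := by
  simp [vectXor]

theorem subXor_length (i : Nat) (P : List (List Int)) :
    ∀ (j : Nat) (acc : List Int), acc.length = i → (subXor i P j acc).length = i := by
  induction P with
  | nil => intro j acc h; exact h
  | cons r t ih =>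
      intro j acc h
      simp only [subXor]
      split
      · exact ih _ _ (vectXor_length i acc r)
      · exact ih _ _ h

-- the zip done by B equals the indexed update done by A, given the Pre_ lengths
theorem vectXor_eq_zip (i : Nat) (acc r : List Int) (ha : acc.length = i) (hr : i ≤ r.length) :
    vectXor i acc r = List.zipWith PySem.Int.bxor acc (r.take i) := by
  apply List.ext_getElem
  · simp [vectXor, ha, hr]
  · intro m hm hm'
    have hmi : m < i := by simpa [vectXor] using hm
    have hmr : m < r.length := lt_of_lt_of_le hmi hr
    simp [vectXor, List.getD_eq_getElem?_getD,
      lt_of_lt_of_le hmi (le_of_eq ha.symm), hmr]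

-- A's while loop computes the common spec on the remaining rows
theorem vectLoop_eq (L : List (List Int)) (i : Nat) :
    ∀ (l : Nat), ∀ (k : Nat) (acc : List Int), l < 2 ^ (L.length - k) →
      vectLoop L i l k acc = subXor i (L.drop k) l acc := by
  intro l
  induction l using Nat.strong_induction_on with
  | _ l ih =>
      intro k acc hl
      by_cases h0 : l = 0
      · subst h0
        rw [vectLoop, if_pos rfl, subXor_zero]
      · have hk : k < L.length := by
          by_contra hk
          have : L.length - k = 0 := by omega
          rw [this] at hl
          omega
        have hdrop : L.drop k = L[k] :: L.drop (k + 1) := List.drop_eq_getElem_cons hk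
        have hget : L.getD k [] = L[k] := by
          simp [List.getD_eq_getElem?_getD, hk]
        rw [vectLoop, if_neg h0, hdrop]
        have hrec : l / 2 < 2 ^ (L.length - (k + 1)) := by
          have hpow : 2 ^ (L.length - k) = 2 * 2 ^ (L.length - (k + 1)) := by
            rw [← pow_succ']
            congr 1
            omega
          omega
        rw [ih (l / 2) (Nat.div_lt_self (Nat.pos_of_ne_zero h0) (by omega)) (k + 1) _ hrec]
        simp [subXor, List.getElem?_eq_getElem hk]

-- B's doubling fold produces exactly the spec values in binary order
theorem foldl_eq_map_subXor (i : Nat) :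
    ∀ (P : List (List Int)), (∀ r ∈ P, i ≤ r.length) →
      P.foldl (fun res row =>
          res ++ res.map (fun v => List.zipWith PySem.Int.bxor v (row.take i)))
        [List.replicate i (0 : Int)]
      = (List.range (2 ^ P.length)).map (fun j => subXor i P j (List.replicate i 0)) := by
  intro P
  induction P using List.reverseRecOn with
  | nil => intro _; rfl
  | append_singleton P r ih =>
      intro hlen
      have hP : ∀ x ∈ P, i ≤ x.length := fun x hx => hlen x (List.mem_append_left _ hx)
      have hr : i ≤ r.length := hlen r (List.mem_append_right _ (List.mem_singleton_self r))
      rw [List.foldl_append, ih hP]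
      have hpow : 2 ^ (P ++ [r]).length = 2 ^ P.length + 2 ^ P.length := by
        simp [pow_succ]; ring
      rw [hpow, List.range_add, List.map_append, List.foldl_cons, List.foldl_nil,
        List.map_map]
      congr 1
      · -- low half: bit P.length clear, subset unchanged
        apply List.map_congr_left
        intro j hj
        have hj' : j < 2 ^ P.length := List.mem_range.mp hj
        rw [subXor_append]
        rw [Nat.div_eq_of_lt hj', subXor_zero]
      · -- high half: bit P.length set, XOR with r on top of entry j
        rw [List.map_map]
        apply List.map_congr_left
        intro j hj
        have hj' : j < 2 ^ P.length := List.mem_range.mp hj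
        have hdiv : (2 ^ P.length + j) / 2 ^ P.length = 1 := by
          rw [Nat.add_div_left _ (Nat.pos_of_ne_zero (by positivity))]
          rw [Nat.div_eq_of_lt hj']
        have hmod : (2 ^ P.length + j) % 2 ^ P.length = j := by
          rw [Nat.add_mod_left, Nat.mod_eq_of_lt hj']
        simp only [Function.comp_apply]
        rw [subXor_append, hdiv, subXor_mod i P (2 ^ P.length + j), hmod]
        show List.zipWith PySem.Int.bxor (subXor i P j (List.replicate i 0)) (r.take i)
            = subXor i [r] 1 (subXor i P j (List.replicate i 0))
        have hacc : (subXor i P j (List.replicate i 0)).length = i :=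
          subXor_length i P j _ (by simp)
        rw [← vectXor_eq_zip i _ r hacc hr]
        simp [subXor]

-- ===== VERDICT (by name: the statement is the Claim_ definition above) =====
theorem vect_spec : Claim_equal_vect := by
  intro L _hDom hPre
  unfold Spec_vect vect vect_alt
  obtain ⟨-, hrows⟩ := hPre
  rw [foldl_eq_map_subXor _ L hrows]
  apply List.map_congr_left
  intro j hj
  have hj' : j < 2 ^ L.length := List.mem_range.mp hj
  have := vectLoop_eq L (L.headD []).length j 0 (List.replicate (L.headD []).length 0)
    (by simpa using hj')
  simpa using this
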